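-- pv_equiv track=rewrite | github.com/jp-amaral/LECI-Projects | 3rd Year/IA - Tetris/student.py | mapHeight
-- ===== SOURCE A (Python) =====
-- def mapHeight(listGames):
--     height = [0] * len(listGames)
--     j = 0
--     for mapa in listGames:
--         for x in range(1,9,1):
--             for y in range(1,30,1):
--                 pos = [x,y]
--                 if pos in mapa:
--                     height[j]+=29-pos[1]+1
--                     break
--         j+=1
--     return height
-- ===== SOURCE B (Python) =====
-- def mapHeight(listGames):
--     heights = []
--     for mapa in listGames:
--         cols = {}
--         for pos in mapa:
--             if len(pos) == 2 and 1 <= pos[0] <= 8 and 1 <= pos[1] <= 29: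
--                 x, y = pos
--                 if x not in cols or y < cols[x]:
--                     cols[x] = y
--         heights.append(sum(30 - y for y in cols.values()))
--     return heights
-- ===== Notes on version B (the rewrite author's own statement) =====
-- stated objective: faster
-- what changed: B replaces A's per-map scan of all 8x29 grid cells (membership test per cell, break at the first hit per column) by a single pass over the map's positions building a dict of the minimum occupied y per column, then sums 30 - y over the dict's values.
import Mathlib
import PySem

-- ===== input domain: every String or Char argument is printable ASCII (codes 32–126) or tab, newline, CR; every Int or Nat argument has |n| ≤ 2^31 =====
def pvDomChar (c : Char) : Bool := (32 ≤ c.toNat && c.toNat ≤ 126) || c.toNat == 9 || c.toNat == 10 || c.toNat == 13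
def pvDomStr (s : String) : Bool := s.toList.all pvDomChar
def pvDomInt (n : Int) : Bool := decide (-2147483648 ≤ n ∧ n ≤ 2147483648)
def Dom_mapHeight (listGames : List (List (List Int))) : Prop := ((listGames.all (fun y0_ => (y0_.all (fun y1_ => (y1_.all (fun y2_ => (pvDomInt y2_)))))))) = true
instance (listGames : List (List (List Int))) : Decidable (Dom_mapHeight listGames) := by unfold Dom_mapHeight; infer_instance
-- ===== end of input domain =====

-- B replaces A's per-column scan of the 8×29 grid by a single pass over each map's
-- positions that indexes the minimum occupied y per column; same return value (alternative/faster on sparse maps).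

-- ===== PORT A =====
-- the `for y in range(1,30,1): … break` loop: some (29 - y + 1) at the first hit, none if no y hits
def mapHeightInner (mapa : List (List Int)) (x : Int) : List Int → Option Int
  | [] => none
  | y :: ys => if [x, y] ∈ mapa then some (29 - y + 1) else mapHeightInner mapa x ys

-- one iteration of `for mapa in listGames`: the x-loop updates height[j] (j is always in range, so
-- List.getD / List.set are exact for Python's height[j] read/write), then j += 1
def mapHeightStep (mapa : List (List Int)) (st : List Int × Nat) : List Int × Nat :=
  ((PySem.List.pyRange 1 9).foldl
      (fun h x =>
        match mapHeightInner mapa x (PySem.List.pyRange 1 30) with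
        | some inc => h.set st.2 (h.getD st.2 0 + inc)
        | none => h) st.1,
   st.2 + 1)

def mapHeight (listGames : List (List (List Int))) : List Int :=
  (listGames.foldl (fun st mapa => mapHeightStep mapa st)
    (List.replicate listGames.length 0, 0)).1

-- ===== PORT B =====
-- one iteration of `for pos in mapa` of Source B: keep the minimum y per column x
def mapHeightAltStep (cols : PySem.Dict Int Int) (pos : List Int) : PySem.Dict Int Int :=
  match pos with
  | [x, y] =>
      if 1 ≤ x ∧ x ≤ 8 ∧ 1 ≤ y ∧ y ≤ 29 then
        if !cols.contains x || decide (y < cols.getD x 0) then cols.insert x y else cols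
      else cols
  | _ => cols

def mapHeight_alt (listGames : List (List (List Int))) : List Int :=
  listGames.foldl
    (fun heights mapa =>
      let cols := mapa.foldl mapHeightAltStep PySem.Dict.empty
      heights ++ [(cols.values.map (fun y => 30 - y)).sum])
    []

-- ===== PRECONDITION & SPEC =====
def Spec_mapHeight (listGames : List (List (List Int))) (out : List Int) : Prop := out = mapHeight_alt listGames
instance (listGames : List (List (List Int))) (out : List Int) : Decidable (Spec_mapHeight listGames out) := by unfold Spec_mapHeight; infer_instance

-- ===== CLAIM (what is proved, stated in full; the proofs are below) =====
def Claim_equal_mapHeight : Prop := ∀ (listGames : List (List (List Int))), Dom_mapHeight listGames → Spec_mapHeight listGames (mapHeight listGames)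

-- ===== LEMMAS AND PROOFS =====

def pvCand (x : Int) : List (List Int) → List Int
  | [] => []
  | p :: rest =>
      match p with
      | [a, b] =>
          if a = x ∧ 1 ≤ a ∧ a ≤ 8 ∧ 1 ≤ b ∧ b ≤ 29 then b :: pvCand x rest else pvCand x rest
      | _ => pvCand x rest
def pvMino (o : Option Int) (y : Int) : Option Int :=
  match o with
  | none => some y
  | some m => if y < m then some y else some m

-- A's per-map column contribution
def pvG (mapa : List (List Int)) (x : Int) : Int :=
  match (pvCand x mapa).foldl pvMino none with
  | none => 0
  | some v => 30 - v

lemma pvCand_mem (x y : Int) (l : List (List Int)) :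
    y ∈ pvCand x l ↔ [x, y] ∈ l ∧ 1 ≤ x ∧ x ≤ 8 ∧ 1 ≤ y ∧ y ≤ 29 := by
  induction l with
  | nil => simp [pvCand]
  | cons p rest ih =>
      match p with
      | [] => simp [pvCand, ih]
      | [a] => simp [pvCand, ih]
      | a :: b :: c :: t => simp [pvCand, ih]
      | [a, b] =>
          simp only [pvCand]
          split_ifs with h
          · simp only [List.mem_cons, ih]
            constructor
            · rintro (rfl | ⟨hm, hb⟩)
              · refine ⟨Or.inl ?_, by omega⟩
                obtain ⟨rfl, -⟩ := h; rfl
              · exact ⟨Or.inr hm, hb⟩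
            · rintro ⟨he | hm, hb⟩
              · left; simp only [List.cons.injEq, and_true] at he; omega
              · right; exact ⟨hm, hb⟩
          · simp only [List.mem_cons, ih]
            constructor
            · rintro ⟨hm, hb⟩; exact ⟨Or.inr hm, hb⟩
            · rintro ⟨he | hm, hb⟩
              · exfalso; apply h
                simp only [List.cons.injEq, and_true] at he
                omega
              · exact ⟨hm, hb⟩
lemma pvMinfold_some (ys : List Int) (o : Option Int) (v : Int)
    (h : ys.foldl pvMino o = some v) :
    (o = some v ∨ v ∈ ys) ∧ (∀ m, o = some m → v ≤ m) ∧ (∀ y ∈ ys, v ≤ y) := by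
  induction ys generalizing o with
  | nil => simp_all
  | cons y ys ih =>
      simp only [List.foldl_cons] at h
      obtain ⟨h1, h2, h3⟩ := ih (pvMino o y) h
      obtain ⟨k, hk⟩ : ∃ k, pvMino o y = some k := by
        cases o <;> simp only [pvMino]
        · exact ⟨_, rfl⟩
        · split <;> exact ⟨_, rfl⟩
      have hvk : v ≤ k := h2 k hk
      have hky : k ≤ y := by
        cases o <;> simp only [pvMino] at hk
        · injection hk with e; omega
        · split at hk <;> injection hk with e <;> omega
      refine ⟨?_, ?_, ?_⟩
      · rcases h1 with h1 | h1
        · cases o with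
          | none =>
              simp only [pvMino] at h1
              right; exact List.mem_cons.mpr (Or.inl (by injection h1 with e; omega))
          | some m =>
              simp only [pvMino] at h1
              split at h1
              · right; exact List.mem_cons.mpr (Or.inl (by injection h1 with e; omega))
              · left; injection h1 with e; rw [e]
        · right; exact List.mem_cons.mpr (Or.inr h1)
      · intro m hm
        subst hm
        simp only [pvMino] at hk
        split at hk <;> injection hk with e <;> omega
      · intro z hz
        rw [List.mem_cons] at hz
        rcases hz with rfl | hz
        · omega
        · exact h3 z hz
lemma pvAltStep_get? (d : PySem.Dict Int Int) (p : List Int) (x : Int) :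
    (mapHeightAltStep d p).get? x = (pvCand x [p]).foldl pvMino (d.get? x) := by
  match p with
  | [] => simp [mapHeightAltStep, pvCand]
  | [a] => simp [mapHeightAltStep, pvCand]
  | a :: b :: c :: t => simp [mapHeightAltStep, pvCand]
  | [a, b] =>
      by_cases hax : a = x
      · subst hax
        by_cases hval : 1 ≤ a ∧ a ≤ 8 ∧ 1 ≤ b ∧ b ≤ 29
        · simp only [mapHeightAltStep, pvCand, hval, if_pos, and_true]
          cases hd : d.get? a with
          | none =>
              have hc : d.contains a = false := by
                rw [PySem.Dict.contains_eq_isSome_get?, hd]; rfl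
              simp [hc, PySem.Dict.get?_insert_self, pvMino]
          | some m =>
              have hc : d.contains a = true := by
                rw [PySem.Dict.contains_eq_isSome_get?, hd]; rfl
              have hgd : d.getD a 0 = m := by rw [PySem.Dict.getD_eq_get?_getD, hd]; rfl
              by_cases hbm : b < m
              · simp [hc, hgd, hbm, PySem.Dict.get?_insert_self, pvMino]
              · simp [hc, hgd, hbm, pvMino, hd]
        · have : ¬ (a = a ∧ 1 ≤ a ∧ a ≤ 8 ∧ 1 ≤ b ∧ b ≤ 29) := by tauto
          simp [mapHeightAltStep, pvCand, hval]
      · have hcand : pvCand x [[a, b]] = [] := by simp [pvCand, hax]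
        rw [hcand, List.foldl_nil]
        by_cases hval : 1 ≤ a ∧ a ≤ 8 ∧ 1 ≤ b ∧ b ≤ 29
        · simp only [mapHeightAltStep, if_pos hval]
          split
          · exact PySem.Dict.get?_insert_of_ne d b (fun h => hax h.symm)
          · rfl
        · simp [mapHeightAltStep, hval]
lemma pvDictInv (l : List (List Int)) (d : PySem.Dict Int Int) (x : Int) :
    (l.foldl mapHeightAltStep d).get? x = (pvCand x l).foldl pvMino (d.get? x) := by
  induction l generalizing d with
  | nil => rfl
  | cons p rest ih =>
      rw [List.foldl_cons, ih, pvAltStep_get?]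
      match p with
      | [] => simp [pvCand]
      | [a] => simp [pvCand]
      | a :: b :: c :: t => simp [pvCand]
      | [a, b] =>
          by_cases h : a = x ∧ 1 ≤ a ∧ a ≤ 8 ∧ 1 ≤ b ∧ b ≤ 29
          · rw [show pvCand x [[a, b]] = [b] from by simp only [pvCand, if_pos h],
              show pvCand x ([a, b] :: rest) = b :: pvCand x rest from by simp only [pvCand, if_pos h]]
            simp
          · rw [show pvCand x [[a, b]] = [] from by simp only [pvCand, if_neg h],
              show pvCand x ([a, b] :: rest) = pvCand x rest from by simp only [pvCand, if_neg h]]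
            simp
lemma pvDictNodup (l : List (List Int)) (d : PySem.Dict Int Int) (h : d.keys.Nodup) :
    (l.foldl mapHeightAltStep d).keys.Nodup := by
  induction l generalizing d with
  | nil => exact h
  | cons p rest ih =>
      rw [List.foldl_cons]
      apply ih
      match p with
      | [] => exact h
      | [a] => exact h
      | a :: b :: c :: t => exact h
      | [a, b] =>
          simp only [mapHeightAltStep]
          split
          · split
            · exact PySem.Dict.nodup_keys_insert d a b h
            · exact h
          · exact h
lemma pvDictKeys (l : List (List Int)) (d : PySem.Dict Int Int) (x : Int)
    (h : x ∈ (l.foldl mapHeightAltStep d).keys) : x ∈ d.keys ∨ (1 ≤ x ∧ x ≤ 8) := by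
  induction l generalizing d with
  | nil => exact Or.inl h
  | cons p rest ih =>
      rw [List.foldl_cons] at h
      rcases ih (mapHeightAltStep d p) h with hm | hb
      · match p with
        | [] => exact Or.inl hm
        | [a] => exact Or.inl hm
        | a :: b :: c :: t => exact Or.inl hm
        | [a, b] =>
            simp only [mapHeightAltStep] at hm
            split at hm
            · split at hm
              · rcases (PySem.Dict.mem_keys_insert d a x b).mp hm with rfl | hm
                · right; omega
                · exact Or.inl hm
              · exact Or.inl hm
            · exact Or.inl hm
      · exact Or.inr hb
lemma pvMinfold_ne_none (ys : List Int) (o : Option Int) (h : o ≠ none ∨ ys ≠ []) :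
    ys.foldl pvMino o ≠ none := by
  induction ys generalizing o with
  | nil => simp_all
  | cons y ys ih =>
      simp only [List.foldl_cons]
      apply ih
      left
      cases o <;> simp only [pvMino]
      · simp
      · split <;> simp
lemma pvRange_empty (a b : Int) (h : ¬ a < b) : PySem.List.pyRange a b = [] := by
  cases hc : PySem.List.pyRange a b with
  | nil => rfl
  | cons z zs =>
      exfalso
      have : z ∈ PySem.List.pyRange a b := by simp [hc]
      rw [PySem.List.mem_pyRange_one] at this; omega
lemma pvInnerChar (mapa : List (List Int)) (x : Int) (hx : 1 ≤ x ∧ x ≤ 8) :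
    ∀ (n : Nat) (a : Int), (30 - a).toNat ≤ n → 1 ≤ a → (∀ y ∈ pvCand x mapa, a ≤ y) →
    mapHeightInner mapa x (PySem.List.pyRange a 30) =
      ((pvCand x mapa).foldl pvMino none).map (fun v => 29 - v + 1) := by
  intro n
  induction n with
  | zero =>
      intro a hn ha hlb
      have h30 : ¬ a < 30 := by omega
      rw [pvRange_empty a 30 h30]
      cases hc : pvCand x mapa with
      | nil => simp [mapHeightInner]
      | cons y ys =>
          exfalso
          have hy : y ∈ pvCand x mapa := by simp [hc]
          have := (pvCand_mem x y mapa).mp hy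
          have := hlb y hy
          omega
  | succ n ih =>
      intro a hn ha hlb
      by_cases h30 : a < 30
      · rw [PySem.List.pyRange_one_cons h30]
        simp only [mapHeightInner]
        by_cases hmem : [x, a] ∈ mapa
        · rw [if_pos hmem]
          have hac : a ∈ pvCand x mapa := (pvCand_mem x a mapa).mpr ⟨hmem, hx.1, hx.2, ha, by omega⟩
          have hne : pvCand x mapa ≠ [] := by intro h; rw [h] at hac; exact List.not_mem_nil hac
          cases hfold : (pvCand x mapa).foldl pvMino none with
          | none => exact absurd hfold (pvMinfold_ne_none _ none (Or.inr hne))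
          | some v =>
              obtain ⟨h1, -, h3⟩ := pvMinfold_some _ none v hfold
              have hv : v ∈ pvCand x mapa := by
                rcases h1 with h1 | h1
                · exact absurd h1 (by simp)
                · exact h1
              have hva : a ≤ v := hlb v hv
              have hav : v ≤ a := h3 a hac
              have : v = a := le_antisymm hav hva
              subst this
              rfl
        · rw [if_neg hmem]
          apply ih (a + 1) (by omega) (by omega)
          intro y hy
          have hb := (pvCand_mem x y mapa).mp hy
          have := hlb y hy
          rcases eq_or_lt_of_le this with rfl | hlt
          · exact absurd hb.1 hmem
          · omega
      · rw [pvRange_empty a 30 h30]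
        cases hc : pvCand x mapa with
        | nil => simp [mapHeightInner]
        | cons y ys =>
            exfalso
            have hy : y ∈ pvCand x mapa := by simp [hc]
            have := (pvCand_mem x y mapa).mp hy
            have := hlb y hy
            omega

-- sum over R equals sum over the K-filter when g vanishes off K
lemma pvSumFilter (R K : List Int) (g : Int → Int) (h : ∀ x ∈ R, x ∉ K → g x = 0) :
    (R.map g).sum = ((R.filter (fun x => decide (x ∈ K))).map g).sum := by
  induction R with
  | nil => rfl
  | cons r R ih =>
      by_cases hr : r ∈ K <;>
        simp [hr, ih (fun x hx => h x (by simp [hx])), h r (by simp) ]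

-- per-map agreement of the two programs
lemma pvPerMap (mapa : List (List Int)) :
    ((PySem.List.pyRange 1 9).map
        (fun x => (mapHeightInner mapa x (PySem.List.pyRange 1 30)).getD 0)).sum =
      ((mapa.foldl mapHeightAltStep PySem.Dict.empty).values.map (fun y => 30 - y)).sum := by
  set d := mapa.foldl mapHeightAltStep PySem.Dict.empty with hd
  have hget : ∀ x, d.get? x = (pvCand x mapa).foldl pvMino none := by
    intro x; rw [hd, pvDictInv]; simp [PySem.Dict.get?_empty]
  have hnodup : d.keys.Nodup := pvDictNodup _ _ PySem.Dict.nodup_keys_empty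
  have hsub : ∀ k ∈ d.keys, 1 ≤ k ∧ k ≤ 8 := by
    intro k hk
    rcases pvDictKeys _ _ _ hk with h | h
    · simp [PySem.Dict.keys_empty] at h
    · exact h
  have hL : ((PySem.List.pyRange 1 9).map
      (fun x => (mapHeightInner mapa x (PySem.List.pyRange 1 30)).getD 0)) =
      (PySem.List.pyRange 1 9).map (fun x => pvG mapa x) := by
    apply List.map_congr_left
    intro x hxR
    have hx := PySem.List.mem_pyRange_one.mp hxR
    rw [pvInnerChar mapa x ⟨hx.1, by omega⟩ 29 1 (by decide) (le_refl 1)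
        (fun y hy => ((pvCand_mem x y mapa).mp hy).2.2.2.1)]
    cases hf : (pvCand x mapa).foldl pvMino none <;> simp [pvG, hf] <;> omega
  rw [hL]
  have hvals : d.values = d.keys.map (fun k => d.getD k 0) :=
    PySem.Dict.values_eq_map_keys d hnodup 0
  rw [hvals, List.map_map]
  have hR : d.keys.map ((fun y => 30 - y) ∘ fun k => d.getD k 0) =
      d.keys.map (fun x => pvG mapa x) := by
    apply List.map_congr_left
    intro k hk
    have hne : d.get? k ≠ none := fun h =>
      ((PySem.Dict.get?_eq_none_iff_not_mem_keys d k).mp h) hk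
    cases hv : d.get? k with
    | none => exact absurd hv hne
    | some v =>
        have hgd : d.getD k 0 = v := by rw [PySem.Dict.getD_eq_get?_getD, hv]; rfl
        have hfv : (pvCand k mapa).foldl pvMino none = some v := by rw [← hget k]; exact hv
        simp [Function.comp, hgd, pvG, hfv]
  rw [hR]
  rw [pvSumFilter (PySem.List.pyRange 1 9) d.keys (fun x => pvG mapa x) ?side]
  · have hperm : ((PySem.List.pyRange 1 9).filter (fun x => decide (x ∈ d.keys))).Perm d.keys := by
      rw [List.perm_ext_iff_of_nodup (List.Nodup.filter _ (by decide)) hnodup]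
      intro a
      simp only [List.mem_filter, decide_eq_true_eq]
      constructor
      · rintro ⟨-, h⟩; exact h
      · intro h
        exact ⟨PySem.List.mem_pyRange_one.mpr (by have := hsub a h; omega), h⟩
    exact (hperm.map (fun x => pvG mapa x)).sum_eq
  case side =>
    intro x hxR hxK
    have h0 : d.get? x = none := (PySem.Dict.get?_eq_none_iff_not_mem_keys d x).mpr hxK
    rw [hget] at h0
    simp [pvG, h0]

-- A's x-loop, acting on the height list at index pre.length
lemma pvXfold (mapa : List (List Int)) (l : List Int) (pre tail : List Int) (v : Int) :
    (l.foldl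
        (fun h x =>
          match mapHeightInner mapa x (PySem.List.pyRange 1 30) with
          | some inc => h.set pre.length (h.getD pre.length 0 + inc)
          | none => h) (pre ++ v :: tail)) =
      pre ++ (v + (l.map (fun x => (mapHeightInner mapa x (PySem.List.pyRange 1 30)).getD 0)).sum) :: tail := by
  induction l generalizing v with
  | nil => simp
  | cons x l ih =>
      simp only [List.foldl_cons, List.map_cons, List.sum_cons]
      cases hi : mapHeightInner mapa x (PySem.List.pyRange 1 30) with
      | none =>
          simp only [Option.getD_none]
          rw [ih, zero_add]
      | some inc =>
          simp only [Option.getD_some]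
          have hget1 : (pre ++ v :: tail).getD pre.length 0 = v := by simp [List.getD]
          rw [hget1,
            show (pre ++ v :: tail).set pre.length (v + inc) = pre ++ (v + inc) :: tail from by simp,
            ih, add_assoc]

-- A's outer fold builds pre ++ map-of-per-map-values
lemma pvOuter (rest : List (List (List Int))) (pre : List Int) :
    (rest.foldl (fun st mapa => mapHeightStep mapa st)
        (pre ++ List.replicate rest.length 0, pre.length)).1 =
      pre ++ rest.map (fun mapa =>
        ((PySem.List.pyRange 1 9).map
          (fun x => (mapHeightInner mapa x (PySem.List.pyRange 1 30)).getD 0)).sum) := by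
  induction rest generalizing pre with
  | nil => simp
  | cons mapa rest ih =>
      simp only [List.foldl_cons, List.length_cons, List.replicate_succ, List.map_cons]
      have hstep : mapHeightStep mapa (pre ++ 0 :: List.replicate rest.length 0, pre.length) =
          (pre ++ (((PySem.List.pyRange 1 9).map
            (fun x => (mapHeightInner mapa x (PySem.List.pyRange 1 30)).getD 0)).sum) :: List.replicate rest.length 0,
           pre.length + 1) := by
        unfold mapHeightStep
        rw [pvXfold]
        simp
      rw [hstep]
      have := ih (pre ++ [((PySem.List.pyRange 1 9).map
          (fun x => (mapHeightInner mapa x (PySem.List.pyRange 1 30)).getD 0)).sum])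
      simp only [List.length_append, List.length_cons, List.append_assoc, List.cons_append,
        List.nil_append, List.length_nil] at this ⊢
      simpa using this

-- ===== VERDICT (by name: the statement is the Claim_ definition above) =====
theorem mapHeight_spec : Claim_equal_mapHeight := by
  intro listGames _
  unfold Spec_mapHeight mapHeight mapHeight_alt
  rw [PySem.List.foldl_append_singleton_eq_map]
  have h := pvOuter listGames []
  simp only [List.nil_append, List.length_nil] at h
  rw [h]
  simp only [List.nil_append]
  exact List.map_congr_left (fun mapa _ => pvPerMap mapa)
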